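-- pv_equiv track=rewrite | github.com/SchulerHunter/CMPSC-132 | LAB2.py | joinedList
-- ===== SOURCE A (Python) =====
-- def joinedList(n):
--     # Verity input integrity
--     if type(n) == int:
--         # Create a list to store the numbers
--         NumList = []
--         # Check if n is positive or negative
--         if n > 0:
--             i = 0
--             # Loop from 1 to the number provided, appending second to receive the higher number
--             while i < n:
--                 i += 1
--                 NumList.append(i)
--             # Loop from n back to 1, appending first. This create the duplicate of n
--             while i >= 1:
--                 NumList.append(i)
--                 i -= 1
--         elif n < 0:
--             i = n - 1
--             # Loop from n to -1 using the same logic as above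
--             while i < -1:
--                 i += 1
--                 NumList.append(i)
--             while i >= n:
--                 NumList.append(i)
--                 i -= 1
--         return NumList
--     else:
--         return 'error'
-- ===== SOURCE B (Python) =====
-- def joinedList(n):
--     # Same guard as the original: bools and non-ints yield 'error'
--     if type(n) != int:
--         return 'error'
--     # Closed-form: element j of the palindrome is lo + min(j, L-1-j) where L = 2*|n|
--     m = abs(n)
--     lo = 1 if n > 0 else n
--     return [lo + min(j, 2 * m - 1 - j) for j in range(2 * m)]
-- ===== Notes on version B (the rewrite author's own statement) =====
-- stated objective: alternative
-- what changed: Replaces A's four while-loops that build an ascending run and then push its mirror with a single comprehension computing each element directly by the closed-form index formula lo + min(j, 2|n|-1-j).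
import Mathlib
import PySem

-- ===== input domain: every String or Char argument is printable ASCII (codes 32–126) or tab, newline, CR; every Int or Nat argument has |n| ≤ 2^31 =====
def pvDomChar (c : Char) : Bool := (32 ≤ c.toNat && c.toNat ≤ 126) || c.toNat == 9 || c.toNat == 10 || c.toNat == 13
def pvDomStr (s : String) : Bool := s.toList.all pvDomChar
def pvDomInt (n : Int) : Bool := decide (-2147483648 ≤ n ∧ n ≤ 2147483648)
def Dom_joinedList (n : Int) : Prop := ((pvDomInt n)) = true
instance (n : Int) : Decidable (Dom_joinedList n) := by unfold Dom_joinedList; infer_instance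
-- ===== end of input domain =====

-- B computes each palindrome element by a closed-form index formula instead of A's four while-loops; objective: alternative.


-- ===== PORT A =====
-- A's first/third while loops: while i < n: i += 1; NumList.append(i); returns final (i, NumList)
def jlWhileUp (i n : Int) (acc : List Int) : Int × List Int :=
  if i < n then jlWhileUp (i + 1) n (acc ++ [i + 1]) else (i, acc)
termination_by (n - i).toNat
decreasing_by omega

-- A's second while loop: while i >= 1: NumList.append(i); i -= 1
def jlWhileDown1 (i : Int) (acc : List Int) : List Int :=
  if 1 ≤ i then jlWhileDown1 (i - 1) (acc ++ [i]) else acc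
termination_by i.toNat
decreasing_by omega

-- A's fourth while loop: while i >= n: NumList.append(i); i -= 1
def jlWhileDownNeg (i n : Int) (acc : List Int) : List Int :=
  if n ≤ i then jlWhileDownNeg (i - 1) n (acc ++ [i]) else acc
termination_by (i - n + 1).toNat
decreasing_by omega

def joinedList (n : Int) : List Int :=
  if n > 0 then
    let st := jlWhileUp 0 n []
    jlWhileDown1 st.1 st.2
  else if n < 0 then
    let st := jlWhileUp (n - 1) (-1) []
    jlWhileDownNeg st.1 n st.2
  else []

-- ===== PORT B =====
-- one comprehension over range(2*|n|), each element by the closed-form index formula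
def joinedList_alt (n : Int) : List Int :=
  let m := |n|
  let lo := if n > 0 then 1 else n
  (PySem.List.pyRange 0 (2 * m) 1).map (fun j => lo + min j (2 * m - 1 - j))

-- ===== PRECONDITION & SPEC =====
def Spec_joinedList (n : Int) (out : List Int) : Prop := out = joinedList_alt n
instance (n : Int) (out : List Int) : Decidable (Spec_joinedList n out) := by unfold Spec_joinedList; infer_instance

-- ===== CLAIM (what is proved, stated in full; the proofs are below) =====
def Claim_equal_joinedList : Prop := ∀ (n : Int), Dom_joinedList n → Spec_joinedList n (joinedList n)

-- ===== LEMMAS AND PROOFS =====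
theorem jlWhileUp_eq (k : Nat) : ∀ (i n : Int) (acc : List Int), (n - i).toNat = k → i ≤ n →
    jlWhileUp i n acc = (n, acc ++ PySem.List.pyRange (i + 1) (n + 1) 1) := by
  induction k with
  | zero =>
    intro i n acc hk hle
    have : i = n := by omega
    subst this
    rw [jlWhileUp]
    simp [PySem.List.pyRange_one_eq_nil (le_refl (i + 1))]
  | succ m ih =>
    intro i n acc hk hle
    have hlt : i < n := by omega
    rw [jlWhileUp, if_pos hlt, ih (i + 1) n _ (by omega) (by omega),
        PySem.List.pyRange_one_cons (by omega : i + 1 < n + 1)]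
    simp

theorem jlWhileDown1_eq (k : Nat) : ∀ (i : Int) (acc : List Int), i.toNat = k →
    jlWhileDown1 i acc = acc ++ PySem.List.pyRange i 0 (-1) := by
  induction k with
  | zero =>
    intro i acc hk
    rw [jlWhileDown1, if_neg (by omega), PySem.List.pyRange_neg_one_eq_nil (by omega)]
    simp
  | succ m ih =>
    intro i acc hk
    rw [jlWhileDown1, if_pos (by omega), ih (i - 1) _ (by omega),
        PySem.List.pyRange_neg_one_cons (by omega : (0:Int) < i)]
    simp

theorem jlWhileDownNeg_eq (k : Nat) : ∀ (i n : Int) (acc : List Int), (i - n + 1).toNat = k → n ≤ i + 1 →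
    jlWhileDownNeg i n acc = acc ++ PySem.List.pyRange i (n - 1) (-1) := by
  induction k with
  | zero =>
    intro i n acc hk hle
    rw [jlWhileDownNeg, if_neg (by omega), PySem.List.pyRange_neg_one_eq_nil (by omega)]
    simp
  | succ m ih =>
    intro i n acc hk hle
    rw [jlWhileDownNeg, if_pos (by omega), ih (i - 1) n _ (by omega) (by omega),
        PySem.List.pyRange_neg_one_cons (by omega : n - 1 < i)]
    simp

-- B's index-formula map equals an ascending run followed by its reverse
theorem half_mirror (lo m : Int) (hm : 0 ≤ m) :
    (PySem.List.pyRange 0 (2 * m) 1).map (fun j => lo + min j (2 * m - 1 - j))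
      = PySem.List.pyRange lo (lo + m) 1 ++ (PySem.List.pyRange lo (lo + m) 1).reverse := by
  rw [PySem.List.pyRange_one_append 0 m (2 * m) hm (by omega), List.map_append]
  congr 1
  · rw [List.map_congr_left (g := fun j => lo + j)
        (by intro j hj; rw [PySem.List.mem_pyRange_one] at hj; simp; omega)]
    simp [PySem.List.pyRange_one, List.map_map]
  · rw [List.map_congr_left (g := fun j => lo + (2 * m - 1 - j))
        (by intro j hj; rw [PySem.List.mem_pyRange_one] at hj; simp; omega)]
    have hrev : (PySem.List.pyRange lo (lo + m) 1).reverse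
        = PySem.List.pyRange (lo + m - 1) (lo - 1) (-1) := by
      rw [PySem.List.pyRange_neg_one_eq_reverse]
      congr 1; ring_nf
    rw [hrev, PySem.List.pyRange_neg_one, PySem.List.pyRange_one, List.map_map]
    have hlen : (lo + m - 1 - (lo - 1)).toNat = (2 * m - m).toNat := by omega
    rw [hlen]
    apply List.map_congr_left
    intro k _
    simp only [Function.comp_apply]
    omega

-- ===== VERDICT (by name: the statement is the Claim_ definition above) =====
theorem joinedList_spec : Claim_equal_joinedList := by
  intro n _
  unfold Spec_joinedList joinedList joinedList_alt
  by_cases hpos : n > 0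
  · rw [if_pos hpos, if_pos hpos,
        jlWhileUp_eq (n - 0).toNat 0 n [] rfl (by omega)]
    simp only [List.nil_append]
    rw [jlWhileDown1_eq n.toNat n _ rfl,
        PySem.List.pyRange_neg_one_eq_reverse, abs_of_pos hpos,
        half_mirror 1 n (by omega)]
    norm_num [add_comm]
  · rw [if_neg hpos, if_neg hpos]
    by_cases hneg : n < 0
    · rw [if_pos hneg,
          jlWhileUp_eq (-1 - (n - 1)).toNat (n - 1) (-1) [] rfl (by omega)]
      simp only [List.nil_append]
      rw [jlWhileDownNeg_eq ((-1 : Int) - n + 1).toNat (-1) n _ rfl (by omega),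
          PySem.List.pyRange_neg_one_eq_reverse, abs_of_neg hneg,
          half_mirror n (-n) (by omega)]
      norm_num
    · have : n = 0 := by omega
      subst this
      rw [if_neg (by omega)]
      simp [PySem.List.pyRange_one_eq_nil]
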